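-- pv_equiv track=rewrite | github.com/caiocfpeixoto/Projeto1-Logica | src/entrada.py | contagem
-- ===== SOURCE A (Python) =====
-- def contagem(arquivo):
--   list = [0, 0, 0, 0, 0, 0]
--   m = 0
--   for a in range(len(arquivo)):
--     if 'PI' in arquivo[a]:
--       if list[0] == 0:
--         m += 1
--         list[0] += 1
--     if 'GS' in arquivo[a]:
--       if list[1] == 0:
--         m += 1
--         list[1] += 1
--     if 'PT' in arquivo[a]:
--       if list[2] == 0:
--         m += 1
--         list[2] += 1
--     if 'LA' in arquivo[a]:
--       if list[3] == 0:
--         m += 1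
--         list[3] += 1
--     if 'SS' in arquivo[a]:
--       if list[4] == 0:
--         m += 1
--         list[4] += 1
--     if 'RP' in arquivo[a]:
--       if list[5] == 0:
--         m += 1
--         list[5] += 1
--   #if :
--
--   return m
-- ===== SOURCE B (Python) =====
-- def contagem(arquivo):
--   return sum(any(marker in linha for linha in arquivo)
--              for marker in ('PI', 'GS', 'PT', 'LA', 'SS', 'RP'))
-- ===== Notes on version B (the rewrite author's own statement) =====
-- stated objective: simpler
-- what changed: Replaced A's single line-outer pass that latches six flag cells in a list and a running counter with a marker-outer sum of six short-circuiting any() membership scans over the lines.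
import Mathlib
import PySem

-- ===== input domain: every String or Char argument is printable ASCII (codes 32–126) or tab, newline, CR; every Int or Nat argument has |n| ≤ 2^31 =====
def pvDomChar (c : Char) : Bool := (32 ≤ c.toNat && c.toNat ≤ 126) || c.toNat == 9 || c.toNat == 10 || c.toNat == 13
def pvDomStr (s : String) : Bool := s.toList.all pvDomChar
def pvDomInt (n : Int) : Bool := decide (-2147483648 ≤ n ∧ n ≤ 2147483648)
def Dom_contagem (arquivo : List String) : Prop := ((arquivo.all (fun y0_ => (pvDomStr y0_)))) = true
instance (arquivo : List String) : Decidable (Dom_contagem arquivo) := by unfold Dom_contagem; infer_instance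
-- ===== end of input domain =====

-- B changes the decomposition (marker-outer any/sum instead of A's line-outer flag-latching pass); objective: simpler.

-- ===== PORT A =====
-- one marker's nested 'if c in line: if cell == 0: m += 1; cell += 1' on the (m, cell) pair
def contagemMark (c : Bool) (ml : Int × Int) : Int × Int :=
  if c then (if ml.2 == 0 then (ml.1 + 1, ml.2 + 1) else ml) else ml

-- state mirrors A's (list[0..5], m); the six marker blocks run in A's order, threading m
def contagemStep (s : Int × Int × Int × Int × Int × Int × Int) (linha : String) :
    Int × Int × Int × Int × Int × Int × Int :=
  match s with
  | (l0, l1, l2, l3, l4, l5, m) =>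
    let p0 := contagemMark (PySem.Str.isIn "PI" linha) (m, l0)
    let p1 := contagemMark (PySem.Str.isIn "GS" linha) (p0.1, l1)
    let p2 := contagemMark (PySem.Str.isIn "PT" linha) (p1.1, l2)
    let p3 := contagemMark (PySem.Str.isIn "LA" linha) (p2.1, l3)
    let p4 := contagemMark (PySem.Str.isIn "SS" linha) (p3.1, l4)
    let p5 := contagemMark (PySem.Str.isIn "RP" linha) (p4.1, l5)
    (p0.2, p1.2, p2.2, p3.2, p4.2, p5.2, p5.1)

def contagem (arquivo : List String) : Int :=
  (arquivo.foldl contagemStep (0, 0, 0, 0, 0, 0, 0)).2.2.2.2.2.2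

-- ===== PORT B =====
def contagem_alt (arquivo : List String) : Int :=
  (["PI", "GS", "PT", "LA", "SS", "RP"].map
    (fun marker => if arquivo.any (fun linha => PySem.Str.isIn marker linha) then (1 : Int) else 0)).sum

-- ===== PRECONDITION & SPEC =====
def Spec_contagem (arquivo : List String) (out : Int) : Prop := out = contagem_alt arquivo
instance (arquivo : List String) (out : Int) : Decidable (Spec_contagem arquivo out) := by unfold Spec_contagem; infer_instance

-- ===== CLAIM (what is proved, stated in full; the proofs are below) =====
def Claim_equal_contagem : Prop := ∀ (arquivo : List String), Dom_contagem arquivo → Spec_contagem arquivo (contagem arquivo)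

-- ===== LEMMAS AND PROOFS =====

theorem contagemMark_key (c : Bool) (m l : Int) (r : Bool) :
    (contagemMark c (m, l)).1 + (cond ((contagemMark c (m, l)).2 == 0 && r) (1 : Int) 0) =
      m + (cond (l == 0 && (c || r)) (1 : Int) 0) := by
  unfold contagemMark
  cases c <;> cases r <;> by_cases hl : l = 0 <;> simp_all [Bool.cond_eq_ite]

theorem contagem_inv (l : List String) (l0 l1 l2 l3 l4 l5 m : Int) :
    (l.foldl contagemStep (l0, l1, l2, l3, l4, l5, m)).2.2.2.2.2.2 =
      m + (cond (l0 == 0 && l.any (fun s => PySem.Str.isIn "PI" s)) (1 : Int) 0)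
        + (cond (l1 == 0 && l.any (fun s => PySem.Str.isIn "GS" s)) (1 : Int) 0)
        + (cond (l2 == 0 && l.any (fun s => PySem.Str.isIn "PT" s)) (1 : Int) 0)
        + (cond (l3 == 0 && l.any (fun s => PySem.Str.isIn "LA" s)) (1 : Int) 0)
        + (cond (l4 == 0 && l.any (fun s => PySem.Str.isIn "SS" s)) (1 : Int) 0)
        + (cond (l5 == 0 && l.any (fun s => PySem.Str.isIn "RP" s)) (1 : Int) 0) := by
  induction l generalizing l0 l1 l2 l3 l4 l5 m with
  | nil => simp
  | cons x t ih =>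
    simp only [List.foldl_cons, List.any_cons, contagemStep]
    rw [ih]
    have h0 := contagemMark_key (PySem.Str.isIn "PI" x) m l0
      (t.any (fun s => PySem.Str.isIn "PI" s))
    have h1 := contagemMark_key (PySem.Str.isIn "GS" x)
      (contagemMark (PySem.Str.isIn "PI" x) (m, l0)).1 l1
      (t.any (fun s => PySem.Str.isIn "GS" s))
    have h2 := contagemMark_key (PySem.Str.isIn "PT" x)
      (contagemMark (PySem.Str.isIn "GS" x) ((contagemMark (PySem.Str.isIn "PI" x) (m, l0)).1, l1)).1 l2
      (t.any (fun s => PySem.Str.isIn "PT" s))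
    have h3 := contagemMark_key (PySem.Str.isIn "LA" x)
      (contagemMark (PySem.Str.isIn "PT" x) ((contagemMark (PySem.Str.isIn "GS" x) ((contagemMark (PySem.Str.isIn "PI" x) (m, l0)).1, l1)).1, l2)).1 l3
      (t.any (fun s => PySem.Str.isIn "LA" s))
    have h4 := contagemMark_key (PySem.Str.isIn "SS" x)
      (contagemMark (PySem.Str.isIn "LA" x) ((contagemMark (PySem.Str.isIn "PT" x) ((contagemMark (PySem.Str.isIn "GS" x) ((contagemMark (PySem.Str.isIn "PI" x) (m, l0)).1, l1)).1, l2)).1, l3)).1 l4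
      (t.any (fun s => PySem.Str.isIn "SS" s))
    have h5 := contagemMark_key (PySem.Str.isIn "RP" x)
      (contagemMark (PySem.Str.isIn "SS" x) ((contagemMark (PySem.Str.isIn "LA" x) ((contagemMark (PySem.Str.isIn "PT" x) ((contagemMark (PySem.Str.isIn "GS" x) ((contagemMark (PySem.Str.isIn "PI" x) (m, l0)).1, l1)).1, l2)).1, l3)).1, l4)).1 l5
      (t.any (fun s => PySem.Str.isIn "RP" s))
    linear_combination h0 + h1 + h2 + h3 + h4 + h5

-- ===== VERDICT (by name: the statement is the Claim_ definition above) =====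
theorem contagem_spec : Claim_equal_contagem := by
  intro arquivo _
  unfold Spec_contagem contagem contagem_alt
  rw [contagem_inv]
  simp only [List.map, List.sum_cons, List.sum_nil, Bool.cond_eq_ite]
  norm_num
  split_ifs <;> ring
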